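-- pv_equiv track=rewrite | github.com/UWPCE-PythonCert-ClassRepos/SP_Online_PY210 | students/duanez2021/lesson02/gridPrinter_part3.py | print_row2
-- ===== SOURCE A (Python) =====
-- def print_row2(column_size, cell_size):
--     #print a row of +/-
--     plus = '+'
--     minus = '-'
--     row = ''
--     # if n < 3 default to 3
--     if cell_size < 1: cell_size = 1
--     if column_size < 1: column_size=1
--
--     i = 1  # loop counter, number of +'s
--     #dash = n//2
--     for k in range(column_size+1):
--         row = row + plus
--         i = i + 1
--         if i <= column_size+1:
--             for y in range(cell_size):
--                 row = row + minus
--     return row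
-- ===== SOURCE B (Python) =====
-- def print_row2(column_size, cell_size):
--     # closed form: one '+'-and-dashes segment repeated, plus the final '+'
--     if cell_size < 1: cell_size = 1
--     if column_size < 1: column_size = 1
--     return ('+' + '-' * cell_size) * column_size + '+'
-- ===== Notes on version B (the rewrite author's own statement) =====
-- stated objective: simpler
-- what changed: Replaces the nested loops with loop counter and guard by a closed-form string: the segment '+' + '-'*cell_size built once and repeated column_size times by string multiplication, plus a trailing '+'.
import Mathlib
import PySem

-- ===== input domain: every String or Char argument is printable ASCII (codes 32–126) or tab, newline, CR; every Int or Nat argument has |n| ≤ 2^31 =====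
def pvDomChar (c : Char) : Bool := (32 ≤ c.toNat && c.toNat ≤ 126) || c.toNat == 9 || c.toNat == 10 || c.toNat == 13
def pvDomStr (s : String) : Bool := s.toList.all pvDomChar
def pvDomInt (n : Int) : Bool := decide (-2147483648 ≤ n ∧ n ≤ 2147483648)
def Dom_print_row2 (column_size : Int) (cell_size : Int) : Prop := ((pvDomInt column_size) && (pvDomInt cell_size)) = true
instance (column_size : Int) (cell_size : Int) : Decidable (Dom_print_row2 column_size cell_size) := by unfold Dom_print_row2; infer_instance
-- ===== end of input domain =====

-- B replaces A's nested loops by the closed-form string ('+' + '-'*cell)*columns + '+' (simpler; same cost).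
-- String concatenation is ported exactly as List Char append (packed with String.ofList at the end).

-- ===== PORT A =====
-- one step of A's outer loop body: row += '+'; i += 1; if i <= column+1: inner dash loop
def printRow2Step (column cell : Int) (st : List Char × Int) (_k : Int) : List Char × Int :=
  let row := st.1 ++ ['+']
  let i := st.2 + 1
  if i ≤ column + 1 then
    ((PySem.List.pyRange 0 cell 1).foldl (fun r (_y : Int) => r ++ ['-']) row, i)
  else (row, i)

def print_row2 (column_size : Int) (cell_size : Int) : String :=
  let cell := if cell_size < 1 then 1 else cell_size
  let column := if column_size < 1 then 1 else column_size
  let st := (PySem.List.pyRange 0 (column + 1) 1).foldl (printRow2Step column cell) (([] : List Char), 1)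
  String.ofList st.1

-- ===== PORT B =====
def print_row2_alt (column_size : Int) (cell_size : Int) : String :=
  let cell := if cell_size < 1 then 1 else cell_size
  let column := if column_size < 1 then 1 else column_size
  -- ('+' + '-' * cell) * column + '+'  on List Char (exact for string repetition/concatenation)
  String.ofList ((List.replicate column.toNat ('+' :: List.replicate cell.toNat '-')).flatten ++ ['+'])

-- ===== PRECONDITION & SPEC =====
def Spec_print_row2 (column_size : Int) (cell_size : Int) (out : String) : Prop := out = print_row2_alt column_size cell_size
instance (column_size : Int) (cell_size : Int) (out : String) : Decidable (Spec_print_row2 column_size cell_size out) := by unfold Spec_print_row2; infer_instance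

-- ===== CLAIM (what is proved, stated in full; the proofs are below) =====
def Claim_equal_print_row2 : Prop := ∀ (column_size : Int) (cell_size : Int), Dom_print_row2 column_size cell_size → Spec_print_row2 column_size cell_size (print_row2 column_size cell_size)

-- ===== LEMMAS AND PROOFS =====

-- the inner dash loop appends cell.toNat dashes
lemma inner_dashes (l : List Int) (row : List Char) :
    l.foldl (fun r (_y : Int) => r ++ ['-']) row = row ++ List.replicate l.length '-' := by
  induction l generalizing row with
  | nil => simp
  | cons x xs ih => simp [List.foldl, ih, List.replicate_succ, List.append_assoc]

-- A's outer loop from value a (with counter i = a+1) up to column, for a ≤ column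
lemma outer_loop (column cell : Int) (a : Int) (row : List Char) (h : a ≤ column) :
    ((PySem.List.pyRange a (column + 1) 1).foldl (printRow2Step column cell) (row, a + 1)).1
      = row ++ (List.replicate (column - a).toNat ('+' :: List.replicate cell.toNat '-')).flatten ++ ['+'] := by
  by_cases hac : a = column
  · subst hac
    rw [show PySem.List.pyRange a (a+1) 1 = [a] from PySem.List.pyRange_one_singleton a]
    simp [printRow2Step, List.foldl]
  · have hlt : a < column := lt_of_le_of_ne h hac
    rw [PySem.List.pyRange_one_cons (by omega : a < column + 1)]
    have hstep : printRow2Step column cell (row, a + 1) a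
        = (row ++ ['+'] ++ List.replicate cell.toNat '-', a + 2) := by
      simp only [printRow2Step, inner_dashes, PySem.List.length_pyRange_one]
      rw [if_pos (by omega)]
      simp
      omega
    have ih := outer_loop column cell (a + 1) (row ++ ['+'] ++ List.replicate cell.toNat '-') (by omega)
    simp only [List.foldl_cons, hstep]
    rw [show a + 1 + 1 = a + 2 by omega] at ih
    rw [ih]
    have hrep : (column - a).toNat = ((column - (a+1)).toNat) + 1 := by omega
    rw [hrep, List.replicate_succ]
    simp [List.append_assoc]
termination_by (column - a).toNat
decreasing_by omega

-- ===== VERDICT (by name: the statement is the Claim_ definition above) =====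
theorem print_row2_spec : Claim_equal_print_row2 := by
  intro column_size cell_size _
  unfold Spec_print_row2 print_row2 print_row2_alt
  have h : (0 : Int) ≤ (if column_size < 1 then 1 else column_size) := by split <;> omega
  have hcol : (1 : Int) ≤ (if column_size < 1 then 1 else column_size) := by split <;> omega
  have key := outer_loop (if column_size < 1 then 1 else column_size)
    (if cell_size < 1 then 1 else cell_size) 0 [] (by omega)
  rw [show (0 : Int) + 1 = 1 from rfl] at key
  simp only [key]
  simp
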